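-- pv_equiv track=rewrite | github.com/weshop4u/Weshop4u.ie | scripts/import-spar-products.py | get_primary_category
-- ===== SOURCE A (Python) =====
-- def get_primary_category(categories_str: str) -> str:
--     """Extract the primary (most specific) category from a comma-separated list."""
--     if not categories_str or not categories_str.strip():
--         return ""
--
--     # Categories are comma-separated, often hierarchical
--     # e.g., "Spar,Fruit n Veg" or "Spar,Beers, Ciders, Cans and Bottles"
--     # We want the most specific one (last non-generic one)
--
--     parts = [p.strip() for p in categories_str.split(",")]
--
--     # Filter out generic top-level categories
--     generic = {"spar", "weshop4u", "shop", "store", "products", "all products"}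
--
--     specific_parts = [p for p in parts if p.lower() not in generic]
--
--     if specific_parts:
--         # Return the last (most specific) category
--         return specific_parts[-1]
--
--     return parts[-1] if parts else ""
-- ===== SOURCE B (Python) =====
-- def get_primary_category(categories_str: str) -> str:
--     """Extract the primary (most specific) category from a comma-separated list."""
--     if not categories_str or not categories_str.strip():
--         return ""
--     generic = {"spar", "weshop4u", "shop", "store", "products", "all products"}
--     # Single character-level streaming pass: no split(), no intermediate lists.
--     best = None
--     cur = ""
--     for ch in categories_str:
--         if ch == ",":
--             p = cur.strip()
--             if p.lower() not in generic:
--                 best = p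
--             cur = ""
--         else:
--             cur += ch
--     p = cur.strip()
--     if p.lower() not in generic:
--         best = p
--     return best if best is not None else p
-- ===== Notes on version B (the rewrite author's own statement) =====
-- stated objective: alternative
-- what changed: Replaces the split/strip-map/filter/negative-index pipeline with a single character-level streaming tokenizer: one forward pass over the raw string that finalizes a segment at each comma and keeps the last non-generic segment seen, never calling split() or building any intermediate list.
import Mathlib
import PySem

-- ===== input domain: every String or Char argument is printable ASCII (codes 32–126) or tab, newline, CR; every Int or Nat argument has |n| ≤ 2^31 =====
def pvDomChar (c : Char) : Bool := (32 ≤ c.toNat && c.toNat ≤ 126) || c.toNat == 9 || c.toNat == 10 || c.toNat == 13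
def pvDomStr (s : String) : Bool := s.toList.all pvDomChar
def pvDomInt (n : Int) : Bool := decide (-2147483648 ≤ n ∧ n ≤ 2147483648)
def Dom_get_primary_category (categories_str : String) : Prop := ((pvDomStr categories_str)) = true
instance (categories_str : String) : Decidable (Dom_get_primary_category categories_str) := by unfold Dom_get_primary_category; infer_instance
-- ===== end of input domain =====

-- B replaces A's split/strip-map/filter/index pipeline with a single character-level
-- streaming pass (a hand tokenizer) that never builds the parts list (alternative algorithm).


-- ===== PORT A =====
def pvGeneric : PySem.Set String :=
  PySem.Set.ofList ["spar", "weshop4u", "shop", "store", "products", "all products"]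

def get_primary_category (categories_str : String) : String :=
  if categories_str = "" ∨ PySem.Str.strip categories_str = "" then ""
  else
    let parts := ((PySem.Str.split? categories_str ",").getD []).map PySem.Str.strip
    let specific_parts := parts.filter (fun p => !(pvGeneric.contains (PySem.Str.lower p)))
    if specific_parts ≠ [] then PySem.List.pyGetD specific_parts (-1) ""
    else if parts ≠ [] then PySem.List.pyGetD parts (-1) "" else ""

-- ===== PORT B =====
-- streaming tokenizer: one forward pass over the characters; at each ',' the current
-- segment is finished (stripped, classified), afterwards the final segment likewise.
def pvScan : List Char → List Char → Option String → String
  | [], cur, best =>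
      let p := PySem.Str.strip (String.ofList cur)
      if !(pvGeneric.contains (PySem.Str.lower p)) then p else best.getD p
  | c :: rest, cur, best =>
      if c = ',' then
        let p := PySem.Str.strip (String.ofList cur)
        pvScan rest [] (if !(pvGeneric.contains (PySem.Str.lower p)) then some p else best)
      else
        pvScan rest (cur ++ [c]) best

def get_primary_category_alt (categories_str : String) : String :=
  if categories_str = "" ∨ PySem.Str.strip categories_str = "" then ""
  else pvScan categories_str.toList [] none

-- ===== PRECONDITION & SPEC =====
def Spec_get_primary_category (categories_str : String) (out : String) : Prop := out = get_primary_category_alt categories_str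
instance (categories_str : String) (out : String) : Decidable (Spec_get_primary_category categories_str out) := by unfold Spec_get_primary_category; infer_instance

-- ===== CLAIM (what is proved, stated in full; the proofs are below) =====
def Claim_equal_get_primary_category : Prop := ∀ (categories_str : String), Dom_get_primary_category categories_str → Spec_get_primary_category categories_str (get_primary_category categories_str)

-- ===== LEMMAS AND PROOFS =====

-- clean one-comma splitter: first segment, remaining segments
def pvSplit1 : List Char → List Char × List (List Char)
  | [] => ([], [])
  | c :: rest =>
      let r := pvSplit1 rest
      if c = ',' then ([], r.1 :: r.2) else (c :: r.1, r.2)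

def pvStripS (seg : List Char) : String := PySem.Str.strip (String.ofList seg)

def pvOk (p : String) : Bool := !(pvGeneric.contains (PySem.Str.lower p))

-- forward processing of a segment list (current segment + remaining segments)
def pvFin (best : Option String) (seg : List Char) : List (List Char) → String
  | [] => if pvOk (pvStripS seg) then pvStripS seg else best.getD (pvStripS seg)
  | s :: ss => pvFin (if pvOk (pvStripS seg) then some (pvStripS seg) else best) s ss

-- PySem's fueled splitter at a single-char separator computes pvSplit1
theorem pvGo_eq (l : List Char) : ∀ (fuel : Nat) (cur : List Char) (acc : List (List Char)),
    l.length ≤ fuel →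
    PySem.Chars.splitOn.go [','] fuel l cur acc
      = acc.reverse ++ ((cur.reverse ++ (pvSplit1 l).1) :: (pvSplit1 l).2) := by
  induction l with
  | nil =>
    intro fuel cur acc _
    cases fuel <;> simp [PySem.Chars.splitOn.go, pvSplit1]
  | cons c rest ih =>
    intro fuel cur acc h
    cases fuel with
    | zero => simp at h
    | succ f =>
      by_cases hc : c = ','
      · subst hc
        rw [show PySem.Chars.splitOn.go [','] (f+1) (','::rest) cur acc
              = PySem.Chars.splitOn.go [','] f rest [] (cur.reverse :: acc) by
            simp [PySem.Chars.splitOn.go, List.isPrefixOf]]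
        rw [ih f [] (cur.reverse :: acc) (by simpa using h)]
        simp [pvSplit1]
      · rw [show PySem.Chars.splitOn.go [','] (f+1) (c::rest) cur acc
              = PySem.Chars.splitOn.go [','] f rest (c :: cur) acc by
            simp only [PySem.Chars.splitOn.go, List.isPrefixOf]
            split
            · rename_i hcc; simp at hcc; exact absurd hcc.symm hc
            · simp]
        rw [ih f (c :: cur) acc (by simpa using h)]
        simp [pvSplit1, hc]

theorem pvSplitOn_eq (cs : List Char) :
    PySem.Chars.splitOn cs [','] = (pvSplit1 cs).1 :: (pvSplit1 cs).2 := by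
  unfold PySem.Chars.splitOn
  rw [pvGo_eq cs (cs.length + 1) [] [] (by omega)]
  simp

-- the streaming scan equals forward processing of the segments of pvSplit1
theorem pvScan_eq_fin (cs : List Char) : ∀ (cur : List Char) (best : Option String),
    pvScan cs cur best = pvFin best (cur ++ (pvSplit1 cs).1) (pvSplit1 cs).2 := by
  induction cs with
  | nil => intro cur best; simp [pvScan, pvSplit1, pvFin, pvStripS, pvOk]
  | cons c rest ih =>
    intro cur best
    by_cases hc : c = ','
    · subst hc
      simp only [pvScan, pvSplit1]
      rw [ih]
      simp [pvFin, pvStripS, pvOk]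
    · simp only [pvScan, if_neg hc, pvSplit1]
      rw [ih]
      simp

theorem pvGetLast?_cons (a : String) (l : List String) (h : l ≠ []) :
    (a :: l).getLast? = l.getLast? := by
  rcases l with _ | ⟨b, t⟩
  · exact absurd rfl h
  · simp [List.getLast?_cons_cons]

-- one filtering-and-best step, in Option form
theorem pvStep (p : String) (l : List String) (best : Option String) :
    ((l.filter pvOk).getLast?.or (if pvOk p then some p else best))
      = (((p :: l).filter pvOk).getLast?.or best) := by
  rw [List.filter_cons]
  by_cases hp : pvOk p
  · rw [if_pos hp, if_pos (by simp [hp])]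
    rcases hF : l.filter pvOk with _ | ⟨x, xs⟩
    · simp
    · rw [pvGetLast?_cons p (x :: xs) (by simp),
          List.getLast?_eq_some_getLast (l := x :: xs) (by simp)]
      simp
  · rw [if_neg (by simp [hp]), if_neg (by simp [hp])]

-- forward processing equals A's filter-then-last selection
theorem pvFin_eq_filter (ss : List (List Char)) : ∀ (best : Option String) (seg : List Char),
    pvFin best seg ss =
      ((((seg :: ss).map pvStripS).filter pvOk).getLast?.or best).getD
        ((((seg :: ss).map pvStripS).getLast?).getD "") := by
  induction ss with
  | nil =>
    intro best seg
    by_cases h : pvOk (pvStripS seg) <;>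
      cases best <;> simp [pvFin, List.filter, h]
  | cons s ss2 ih =>
    intro best seg
    simp only [pvFin]
    rw [ih]
    simp only [List.map_cons]
    have hlast : (pvStripS seg :: pvStripS s :: List.map pvStripS ss2).getLast?
        = (pvStripS s :: List.map pvStripS ss2).getLast? :=
      pvGetLast?_cons _ _ (by simp)
    rw [hlast, pvStep]

-- A's parts are exactly the stripped pvSplit1 segments
theorem pvParts_eq (s : String) :
    ((PySem.Str.split? s ",").getD []).map PySem.Str.strip
      = ((pvSplit1 s.toList).1 :: (pvSplit1 s.toList).2).map pvStripS := by
  have : PySem.Str.split? s "," =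
      some ((PySem.Chars.splitOn s.toList [',']).map String.ofList) := by
    simp [PySem.Str.split?, PySem.Chars.split?]
  rw [this, pvSplitOn_eq]
  simp [pvStripS, Function.comp]

-- ===== VERDICT (by name: the statement is the Claim_ definition above) =====
theorem get_primary_category_spec : Claim_equal_get_primary_category := by
  unfold Claim_equal_get_primary_category
  intro s _
  unfold Spec_get_primary_category get_primary_category get_primary_category_alt
  by_cases h0 : s = "" ∨ PySem.Str.strip s = ""
  · simp [h0]
  · simp only [h0, if_false]
    rw [pvScan_eq_fin, List.nil_append, pvFin_eq_filter, pvParts_eq]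
    set parts := ((pvSplit1 s.toList).1 :: (pvSplit1 s.toList).2).map pvStripS with hp
    have hok : (fun p => !(pvGeneric.contains (PySem.Str.lower p))) = pvOk := by
      funext p; rfl
    rw [hok]
    have hpne : parts ≠ [] := by simp [hp]
    by_cases hspec : parts.filter pvOk = []
    · simp only [hspec, ne_eq, not_true_eq_false, if_false]
      rw [if_pos hpne, PySem.List.pyGetD_neg_one parts "" hpne,
          List.getLast?_eq_some_getLast hpne]
      simp only [List.getLast?_nil, Option.none_or, Option.getD_none, Option.getD_some]
    · rw [if_pos hspec, PySem.List.pyGetD_neg_one (parts.filter pvOk) "" hspec,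
          List.getLast?_eq_some_getLast hspec]
      simp only [Option.some_or, Option.getD_some]
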